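/- GENERATED by tools/from_farm_form.py from farm.toyh/worked/clamp_length/Proof.lean (a worked proof of the farm's unit `clamp_length`,
   accepted by the verdict) — do not edit. -/
import Toyh.Spec.Units.clamp_length
open X86 X86.User Asan ProgX.Base

set_option maxRecDepth 4000
set_option maxHeartbeats 4000000

namespace Toyh.Spec.Proved.clamp_length
open Toyh.Spec.clamp_length (Statement)

/-- A register whose sign bit is clear, read as a signed number, is its unsigned value
(what `js` / `jg` at 0x1050e3 / 0x1050e9 compare). -/
theorem clamp_toInt_of_msb_false_w (x : Word) (h : x.toBitVec.msb = false) : x.toBitVec.toInt = (x.toNat : Int) := by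
  rw [BitVec.toInt_eq_msb_cond, h]
  simp only [Bool.false_eq_true, if_false, UInt64.toNat_toBitVec]

/-- A register whose sign bit is clear is below 2^63. -/
theorem clamp_lt_of_msb_false_w (x : Word) (h : x.toBitVec.msb = false) : x.toNat < 2 ^ 63 := by
  rw [BitVec.msb_eq_decide] at h
  simp only [decide_eq_false_iff_not, UInt64.toNat_toBitVec] at h
  omega

/-- A register whose sign bit is set is at least 2^63. -/
theorem clamp_ge_of_msb_true_w (x : Word) (h : x.toBitVec.msb = true) : 2 ^ 63 ≤ x.toNat := by
  rw [BitVec.msb_eq_decide] at h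
  simp only [decide_eq_true_eq, UInt64.toNat_toBitVec] at h
  omega

end Toyh.Spec.Proved.clamp_length

/-- `clamp_length` satisfies its contract: three `ret` paths, no memory access but the `ret`'s. -/
theorem Toyh.Spec.Proved.clamp_length_ok : Toyh.Spec.clamp_length.Statement := by
  intro Lay hLay μ hμ u₀ hcode others frames u ret he hpre
  v_entry he
  u_walk hcode [hμ.vendor] span [ProgX.Base.L.textLo, ProgX.Base.L.textHi] side (v_side)
  · -- 0x1050ef: len < 0 (toyh.c:23): `mov eax, 0 ; ret`
    refine ReachVia.done ?_
    v_returned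
    have hge := Toyh.Spec.Proved.clamp_length.clamp_ge_of_msb_true_w _ hbr_1050e3
    refine ⟨?_, ?_, ?_⟩
    · rw [w_rax, toNat_ofBV32]
      decide
    · intro hlt
      omega
    · rw [w_mem]
      exact Mem.EqOn.refl _ _ _
  · -- 0x1050f5: len > 64 (toyh.c:26): `mov eax, 64 ; ret`
    refine ReachVia.done ?_
    v_returned
    have hint := Toyh.Spec.Proved.clamp_length.clamp_toInt_of_msb_false_w _ hbr_1050e3
    rw [hint] at hbr_1050e9
    have h64 : (64#64).toInt = 64 := by decide
    rw [h64] at hbr_1050e9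
    refine ⟨?_, ?_, ?_⟩
    · rw [w_rax, toNat_ofBV32]
      decide
    · intro hlt
      rw [w_rax, toNat_ofBV32]
      have e : (64#32).toNat = 64 := by decide
      rw [e]
      omega
    · rw [w_mem]
      exact Mem.EqOn.refl _ _ _
  · -- 0x1050eb: 0 ≤ len ≤ 64 (toyh.c:28): `mov rax, rdi ; ret`
    refine ReachVia.done ?_
    v_returned
    have hint := Toyh.Spec.Proved.clamp_length.clamp_toInt_of_msb_false_w _ hbr_1050e3
    rw [hint] at hbr_1050e9
    have h64 : (64#64).toInt = 64 := by decide
    rw [h64] at hbr_1050e9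
    refine ⟨?_, ?_, ?_⟩
    · rw [w_rax]
      omega
    · intro hlt
      rw [w_rax]
      exact Nat.le_refl _
    · rw [w_mem]
      exact Mem.EqOn.refl _ _ _
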